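-- pv_equiv track=rewrite | github.com/anish531213/Interesting-Python-problems | arraypn.py | sum_0
-- ===== SOURCE A (Python) =====
-- def sum_0(l):
--     new = []
--     dn = dict()
--     dp = dict()
--     for i in l:
--         if i >= 0:
--             z = dp.get(i, 0)
--             z += 1
--             dp[i] = z
--         else:
--             z = dn.get(i, 0)
--             z += 1
--             dn[i] = z
--
--     for j in dp:
--         if (-j) in dn:
--             new.append((j, -j))
--
--     return new
-- ===== SOURCE B (Python) =====
-- def sum_0(l):
--     out = []
--     rest = list(l)
--     while rest:
--         x = rest[0]
--         if x > 0 and -x in l: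
--             out.append((x, -x))
--         rest = [y for y in rest[1:] if y != x]
--     return out
-- ===== Notes on version B (the rewrite author's own statement) =====
-- stated objective: alternative
-- what changed: Replaces A's two count dicts and dict-key scan by a hash-free worklist loop: repeatedly take the head of the remaining list, emit (x,-x) when the head is positive and its negation occurs in the original list, and filter all copies of the head out of the worklist (trades hashing for quadratic list scans).
import Mathlib
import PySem

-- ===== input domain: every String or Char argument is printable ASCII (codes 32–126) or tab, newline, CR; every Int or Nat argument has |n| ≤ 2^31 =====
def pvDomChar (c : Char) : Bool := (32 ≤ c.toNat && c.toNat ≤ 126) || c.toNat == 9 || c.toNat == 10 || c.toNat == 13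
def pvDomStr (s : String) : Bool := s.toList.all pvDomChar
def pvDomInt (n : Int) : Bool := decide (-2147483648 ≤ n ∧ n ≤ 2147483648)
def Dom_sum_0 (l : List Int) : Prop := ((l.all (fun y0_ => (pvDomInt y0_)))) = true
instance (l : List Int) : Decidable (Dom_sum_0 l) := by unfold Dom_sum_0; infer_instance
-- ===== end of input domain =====

-- B drops A's two count dicts entirely: a worklist loop takes the head, emits its
-- pair when it is positive and its negation occurs anywhere in the list, and filters
-- all copies of the head out of the remaining worklist (objective: alternative —
-- no hashing, quadratic list scans instead).

-- ===== PORT A =====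
def sum_0 (l : List Int) : List (Int × Int) :=
  let new : List (Int × Int) := []
  let s := l.foldl
    (fun (s : PySem.Dict Int Int × PySem.Dict Int Int) i =>
      if 0 ≤ i then (s.1, s.2.modify i 0 (· + 1)) else (s.1.modify i 0 (· + 1), s.2))
    (PySem.Dict.empty, PySem.Dict.empty)
  (PySem.Dict.keys s.2).foldl
    (fun new j => if PySem.Dict.contains s.1 (-j) then new ++ [(j, -j)] else new) new

-- ===== PORT B =====
-- the comprehension '[y for y in rest[1:] if y != x]' of Source B
def pyRemoveAll (x : Int) (ys : List Int) : List Int := ys.filter (fun y => decide (y ≠ x))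

theorem length_pyRemoveAll_le (x : Int) (ys : List Int) : (pyRemoveAll x ys).length ≤ ys.length :=
  List.length_filter_le _ _

-- Source B's while loop; state = (rest, out), 'l' is the original list
def sum0Loop (l : List Int) (rest : List Int) (out : List (Int × Int)) : List (Int × Int) :=
  match rest with
  | [] => out
  | x :: rs =>
    sum0Loop l (pyRemoveAll x rs) (if 0 < x ∧ (-x) ∈ l then out ++ [(x, -x)] else out)
termination_by rest.length
decreasing_by all_goals exact Nat.lt_succ_of_le (length_pyRemoveAll_le _ _)

def sum_0_alt (l : List Int) : List (Int × Int) := sum0Loop l l []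

-- ===== PRECONDITION & SPEC =====
def Spec_sum_0 (l : List Int) (out : List (Int × Int)) : Prop := out = sum_0_alt l
instance (l : List Int) (out : List (Int × Int)) : Decidable (Spec_sum_0 l out) := by unfold Spec_sum_0; infer_instance

-- ===== CLAIM (what is proved, stated in full; the proofs are below) =====
def Claim_equal_sum_0 : Prop := ∀ (l : List Int), Dom_sum_0 l → Spec_sum_0 l (sum_0 l)

-- ===== LEMMAS AND PROOFS =====

-- set(xs filtered) = set(xs) filtered
theorem ofList_filter (p : Int → Bool) (xs : List Int) :
    PySem.Set.ofList (xs.filter p) = (PySem.Set.ofList xs).filter p := by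
  induction xs with
  | nil => rfl
  | cons x xs ih =>
    by_cases hp : p x = true
    · simp only [List.filter_cons, hp, if_pos trivial, PySem.Set.ofList_cons, ih,
        PySem.Set.discard, List.filter_filter]
      congr 1
      apply List.filter_congr
      intro a _
      rw [Bool.and_comm]
    · simp only [List.filter_cons, hp, PySem.Set.ofList_cons, ih,
        Bool.false_eq_true, if_false, PySem.Set.discard, List.filter_filter]
      apply List.filter_congr
      intro a _
      by_cases hax : a = x
      · subst hax; simp [hp]
      · simp [hax]

-- A's first loop splits into two independent counting folds over the sign-filtered lists.
theorem foldA_split (l : List Int) (dn dp : PySem.Dict Int Int) :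
    l.foldl
      (fun (s : PySem.Dict Int Int × PySem.Dict Int Int) i =>
        if 0 ≤ i then (s.1, s.2.modify i 0 (· + 1)) else (s.1.modify i 0 (· + 1), s.2))
      (dn, dp) =
    ((l.filter (fun i => decide (i < 0))).foldl (fun d x => d.modify x 0 (· + 1)) dn,
     (l.filter (fun i => decide (0 ≤ i))).foldl (fun d x => d.modify x 0 (· + 1)) dp) := by
  induction l generalizing dn dp with
  | nil => simp
  | cons x xs ih =>
    by_cases hx : 0 ≤ x
    · have hx' : ¬ x < 0 := by omega
      simp [hx, hx', ih]
    · have hx' : x < 0 := by omega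
      simp [hx, hx', ih]

-- the common canonical value of both programs
theorem sum_0_canon (l : List Int) :
    sum_0 l = ((PySem.Set.ofList l).filter
        (fun x => decide (0 < x) && decide ((-x) ∈ l))).map (fun x => (x, -x)) := by
  unfold sum_0
  simp only [foldA_split]
  rw [PySem.List.foldl_append_if, PySem.Dict.keys_foldl_modify]
  have hkeys : PySem.Set.update (PySem.Dict.keys (PySem.Dict.empty : PySem.Dict Int Int))
      (l.filter (fun i => decide (0 ≤ i))) =
      PySem.Set.ofList (l.filter (fun x => decide (0 ≤ x))) := rfl
  rw [hkeys, ofList_filter]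
  simp only [List.nil_append, List.filter_filter]
  congr 1
  apply List.filter_congr
  intro j hj
  rw [PySem.Dict.contains_eq_decide_mem_keys, PySem.Dict.keys_foldl_modify]
  have : PySem.Set.update (PySem.Dict.keys (PySem.Dict.empty : PySem.Dict Int Int))
      (l.filter (fun i => decide (i < 0))) =
      PySem.Set.ofList (l.filter (fun i => decide (i < 0))) := rfl
  rw [this]
  simp only [PySem.Set.mem_ofList, List.mem_filter, decide_eq_true_eq]
  by_cases h1 : (-j) ∈ l <;> by_cases h2 : 0 < j <;>
    simp [h1, h2] <;> omega

theorem ofList_removeAll (x : Int) (rs : List Int) :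
    PySem.Set.ofList (pyRemoveAll x rs) = PySem.Set.discard (PySem.Set.ofList rs) x := by
  rw [pyRemoveAll, ofList_filter]
  simp only [PySem.Set.discard]
  apply List.filter_congr
  intro a _
  by_cases hax : a = x
  · subst hax; simp
  · simp [hax]

theorem sum0Loop_canon (l : List Int) : ∀ (rest : List Int) (out : List (Int × Int)),
    sum0Loop l rest out = out ++ ((PySem.Set.ofList rest).filter
        (fun x => decide (0 < x) && decide ((-x) ∈ l))).map (fun x => (x, -x)) := by
  intro rest out
  induction rest, out using sum0Loop.induct l with
  | case1 out => simp [sum0Loop]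
  | case2 acc x rs ih =>
    simp only [dite_eq_ite] at ih
    rw [sum0Loop, ih, ofList_removeAll, PySem.Set.ofList_cons, List.filter_cons]
    by_cases hcond : 0 < x ∧ (-x) ∈ l
    · rw [if_pos hcond, if_pos (by simpa using hcond)]
      simp
    · rw [if_neg hcond, if_neg (by simpa using hcond)]

-- ===== VERDICT (by name: the statement is the Claim_ definition above) =====
theorem sum_0_spec : Claim_equal_sum_0 := by
  intro l _
  show sum_0 l = sum_0_alt l
  rw [sum_0_canon, sum_0_alt, sum0Loop_canon, List.nil_append]
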